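-- pv_equiv track=rewrite | github.com/Shreyyyyy/trend-bot | trend_bot/notify_telegram.py | _clean_for_telegram
-- ===== SOURCE A (Python) =====
-- def _clean_for_telegram(text: str) -> str:
--     # Keep it plain and readable on mobile.
--     # - Strip markdown-ish headers/formatting
--     # - Collapse extra blank lines
--     lines = []
--     for raw in text.splitlines():
--         s = raw.strip()
--         if not s:
--             # keep a single blank line (handled later)
--             lines.append("")
--             continue
--         # Drop common markdown header prefixes
--         while s.startswith("#"):
--             s = s.lstrip("#").strip()
--         # Normalize bullets
--         if s.startswith("-"):
--             s = "• " + s.lstrip("-").strip()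
--         lines.append(s)
--
--     # collapse multiple blank lines
--     out = []
--     blank = False
--     for l in lines:
--         if l == "":
--             if blank:
--                 continue
--             blank = True
--             out.append("")
--         else:
--             blank = False
--             out.append(l)
--     return "\n".join(out).strip()
-- ===== SOURCE B (Python) =====
-- def _transform(raw: str) -> str:
--     s = raw.strip()
--     while s.startswith("#"):
--         s = s.lstrip("#").strip()
--     if s.startswith("-"):
--         s = "• " + s.lstrip("-").strip()
--     return s
--
--
-- def _clean_for_telegram(text: str) -> str:
--     # Group the transformed non-blank lines into paragraphs (blank runs are
--     # the separators) and join the paragraphs with a double newline.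
--     paras = []
--     cur = []
--     for raw in text.splitlines():
--         s = _transform(raw)
--         if s:
--             cur.append(s)
--         elif cur:
--             paras.append(cur)
--             cur = []
--     if cur:
--         paras.append(cur)
--     return "\n\n".join("\n".join(p) for p in paras).strip()
-- ===== Notes on version B (the rewrite author's own statement) =====
-- stated objective: alternative
-- what changed: Replaced A's two staged passes (build a transformed line list, then rescan it with a blank flag to collapse blank runs) by a paragraph-grouping fold: transformed non-blank lines are accumulated into paragraphs with blank runs as separators, and the result is rendered by joining paragraphs with a double newline.
import Mathlib
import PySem

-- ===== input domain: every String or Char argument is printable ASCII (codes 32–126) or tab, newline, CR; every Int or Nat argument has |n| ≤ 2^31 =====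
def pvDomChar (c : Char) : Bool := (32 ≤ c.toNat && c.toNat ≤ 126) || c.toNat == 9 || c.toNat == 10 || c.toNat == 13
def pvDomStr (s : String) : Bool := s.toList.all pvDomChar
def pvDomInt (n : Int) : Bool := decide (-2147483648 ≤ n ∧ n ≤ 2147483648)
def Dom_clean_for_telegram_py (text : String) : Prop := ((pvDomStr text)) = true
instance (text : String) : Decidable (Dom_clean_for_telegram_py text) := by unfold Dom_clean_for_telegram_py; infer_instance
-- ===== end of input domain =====

-- B groups transformed non-blank lines into paragraphs (blank runs are separators) and joins them
-- with "\n\n", instead of A's two staged passes over a flat line list: same output, different shape.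

-- helper cited by pvHashStrip's termination proof
theorem pv_strip_len_le (s : List Char) : (PySem.Chars.strip s).length ≤ s.length := by
  simp only [PySem.Chars.strip, PySem.Chars.rstrip, PySem.Chars.lstrip]
  calc (List.dropWhile PySem.Chars.isspace (List.dropWhile PySem.Chars.isspace s).reverse).reverse.length
      ≤ (List.dropWhile PySem.Chars.isspace s).reverse.length := by
        rw [List.length_reverse]; exact List.length_dropWhile_le _ _
    _ ≤ s.length := by rw [List.length_reverse]; exact List.length_dropWhile_le _ _

-- the `while s.startswith("#"): s = s.lstrip("#").strip()` loop, appearing verbatim in A and in B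
def pvHashStrip (s : List Char) : List Char :=
  if h : PySem.Chars.startswith s ['#'] = true then
    pvHashStrip (PySem.Chars.strip (s.dropWhile (· == '#')))
  else s
termination_by s.length
decreasing_by
  simp only [PySem.Chars.startswith] at h
  obtain ⟨t, rfl⟩ := List.isPrefixOf_iff_prefix.mp h
  calc (PySem.Chars.strip ((['#'] ++ t).dropWhile (· == '#'))).length
      ≤ ((['#'] ++ t).dropWhile (· == '#')).length := pv_strip_len_le _
    _ = (t.dropWhile (· == '#')).length := by simp
    _ ≤ t.length := List.length_dropWhile_le _ _
    _ < (['#'] ++ t).length := by simp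

-- ===== PORT A =====
-- pass 1: build the transformed `lines` list; pass 2: rescan it collapsing blank runs with a flag
def clean_for_telegram_py (text : String) : String :=
  let lines := (PySem.Chars.splitlines text.toList).foldl
    (fun (acc : List (List Char)) raw =>
      let s := PySem.Chars.strip raw
      if s = [] then acc ++ [([] : List Char)]
      else
        let s := pvHashStrip s
        let s := if PySem.Chars.startswith s ['-'] then
            "• ".toList ++ PySem.Chars.strip (s.dropWhile (· == '-'))
          else s
        acc ++ [s]) []
  let res := lines.foldl
    (fun (st : List (List Char) × Bool) l =>
      if l = [] then
        if st.2 then st else (st.1 ++ [([] : List Char)], true)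
      else (st.1 ++ [l], false)) ([], false)
  String.ofList (PySem.Chars.strip (PySem.Chars.join ['\n'] res.1))

-- ===== PORT B =====
-- Source B's _transform helper
def pvTransform (raw : List Char) : List Char :=
  let s := PySem.Chars.strip raw
  let s := pvHashStrip s
  if PySem.Chars.startswith s ['-'] then
    "• ".toList ++ PySem.Chars.strip (s.dropWhile (· == '-'))
  else s

-- Source B's loop body: `if s: cur.append(s)  elif cur: paras.append(cur); cur = []`
def pvAccum (st : List (List (List Char)) × List (List Char)) (s : List Char) :
    List (List (List Char)) × List (List Char) :=
  if s ≠ [] then (st.1, st.2 ++ [s])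
  else if st.2 ≠ [] then (st.1 ++ [st.2], ([] : List (List Char)))
  else st

-- group lines into paragraphs, then render with "\n\n".join("\n".join(p) for p in paras)
def clean_for_telegram_py_alt (text : String) : String :=
  let st := (PySem.Chars.splitlines text.toList).foldl
    (fun st raw => pvAccum st (pvTransform raw)) ([], [])
  let paras := if st.2 ≠ [] then st.1 ++ [st.2] else st.1
  String.ofList (PySem.Chars.strip
    (PySem.Chars.join ['\n', '\n'] (paras.map (PySem.Chars.join ['\n']))))

-- ===== PRECONDITION & SPEC =====
def Spec_clean_for_telegram_py (text : String) (out : String) : Prop := out = clean_for_telegram_py_alt text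
instance (text : String) (out : String) : Decidable (Spec_clean_for_telegram_py text out) := by unfold Spec_clean_for_telegram_py; infer_instance

-- ===== CLAIM (what is proved, stated in full; the proofs are below) =====
def Claim_equal_clean_for_telegram_py : Prop := ∀ (text : String), Dom_clean_for_telegram_py text → Spec_clean_for_telegram_py text (clean_for_telegram_py text)

-- ===== LEMMAS AND PROOFS =====

theorem pvHashStrip_nil : pvHashStrip [] = [] := by
  unfold pvHashStrip; rfl

theorem pvTransform_nil_of_strip_nil (raw : List Char) (h : PySem.Chars.strip raw = []) :
    pvTransform raw = [] := by
  simp [pvTransform, h, pvHashStrip_nil, PySem.Chars.startswith]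

-- A's first pass equals mapping Source B's _transform over the lines
theorem pv_lines_eq (L : List (List Char)) (acc : List (List Char)) :
    L.foldl (fun (acc : List (List Char)) raw =>
      let s := PySem.Chars.strip raw
      if s = [] then acc ++ [([] : List Char)]
      else
        let s := pvHashStrip s
        let s := if PySem.Chars.startswith s ['-'] then
            "• ".toList ++ PySem.Chars.strip (s.dropWhile (· == '-'))
          else s
        acc ++ [s]) acc = acc ++ L.map pvTransform := by
  induction L generalizing acc with
  | nil => simp
  | cons raw L ih =>
    simp only [List.foldl_cons, List.map_cons]
    by_cases h : PySem.Chars.strip raw = []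
    · simp only [h, ih, pvTransform_nil_of_strip_nil raw h]
      simp
    · simp only [if_neg h, ih]
      simp [pvTransform]

-- intercalate unfolding lemmas
theorem pv_ic_nil {α : Type} (sep : List α) : List.intercalate sep [] = [] := rfl

theorem pv_ic_single {α : Type} (sep x : List α) : List.intercalate sep [x] = x := by
  simp [List.intercalate]

theorem pv_ic_cons2 {α : Type} (sep x y : List α) (zs : List (List α)) :
    List.intercalate sep (x :: y :: zs) = x ++ sep ++ List.intercalate sep (y :: zs) := by
  simp [List.intercalate, List.intersperse]

theorem pv_ic_append {α : Type} (sep : List α) (xs ys : List (List α))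
    (hx : xs ≠ []) (hy : ys ≠ []) :
    List.intercalate sep (xs ++ ys) = List.intercalate sep xs ++ sep ++ List.intercalate sep ys := by
  induction xs with
  | nil => exact absurd rfl hx
  | cons x xs ih =>
    cases xs with
    | nil =>
      cases ys with
      | nil => exact absurd rfl hy
      | cons y ys => simp [pv_ic_cons2, pv_ic_single]
    | cons x2 xs2 =>
      have ihh := ih (by simp)
      simp only [List.cons_append] at ihh ⊢
      rw [pv_ic_cons2 sep x x2 (xs2 ++ ys), ihh, pv_ic_cons2 sep x x2 xs2]
      simp [List.append_assoc]

theorem pv_ic_snoc {α : Type} (sep : List α) (xs : List (List α)) (y : List α) (hx : xs ≠ []) :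
    List.intercalate sep (xs ++ [y]) = List.intercalate sep xs ++ sep ++ y := by
  rw [pv_ic_append sep xs [y] hx (by simp), pv_ic_single]

-- extend the last paragraph by one more line
theorem pv_ic_last_extend {α : Type} (sep : List (List α)) (ps : List (List (List α)))
    (c : List (List α)) (t : List α) :
    List.intercalate sep (ps ++ [c ++ [t]]) = List.intercalate sep (ps ++ [c]) ++ [t] := by
  cases ps with
  | nil => simp [pv_ic_single]
  | cons p ps =>
    rw [pv_ic_snoc sep _ _ (by simp), pv_ic_snoc sep _ _ (by simp)]
    simp [List.append_assoc]

-- nested join: "\n".join over a [""]-intercalated paragraph list is "\n\n".join of joined paragraphs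
theorem pv_join_nest (P : List (List (List Char))) (h : ∀ p ∈ P, p ≠ []) :
    List.intercalate ['\n'] (List.intercalate [([] : List Char)] P)
      = List.intercalate ['\n', '\n'] (P.map (List.intercalate ['\n'])) := by
  induction P with
  | nil => rfl
  | cons p P ih =>
    cases P with
    | nil => simp [pv_ic_single]
    | cons q Q =>
      have hp : p ≠ [] := h p (by simp)
      have hq : List.intercalate [([] : List Char)] (q :: Q) ≠ [] := by
        cases Q with
        | nil =>
          rw [pv_ic_single]; exact h q (by simp)
        | cons r R =>
          rw [pv_ic_cons2]
          have : q ≠ [] := h q (by simp)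
          cases q with
          | nil => exact absurd rfl this
          | cons a as => simp
      have ihh := ih (fun x hx => h x (by simp [hx]))
      rw [pv_ic_cons2, List.append_assoc, pv_ic_append ['\n'] p _ hp (by simp),
        pv_ic_append ['\n'] [([] : List Char)] _ (by simp) hq, pv_ic_single, ihh]
      simp only [List.map_cons]
      rw [pv_ic_cons2]
      simp [List.append_assoc]

-- strip absorbs a leading newline
theorem pv_strip_cons_nl (s : List Char) :
    PySem.Chars.strip ('\n' :: s) = PySem.Chars.strip s := by
  simp [PySem.Chars.strip, PySem.Chars.lstrip,
    show PySem.Chars.isspace '\n' = true from by decide]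

theorem pv_rstrip_snoc_nl (s : List Char) :
    PySem.Chars.rstrip (s ++ ['\n']) = PySem.Chars.rstrip s := by
  simp [PySem.Chars.rstrip, show PySem.Chars.isspace '\n' = true from by decide]

-- strip absorbs a trailing newline
theorem pv_strip_snoc_nl (s : List Char) :
    PySem.Chars.strip (s ++ ['\n']) = PySem.Chars.strip s := by
  simp only [PySem.Chars.strip, PySem.Chars.lstrip, List.dropWhile_append]
  by_cases h : (List.dropWhile PySem.Chars.isspace s).isEmpty = true
  · rw [if_pos h]
    rw [List.isEmpty_iff] at h
    rw [h]
    simp [show PySem.Chars.isspace '\n' = true from by decide, PySem.Chars.rstrip]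
  · rw [if_neg h, pv_rstrip_snoc_nl]

-- strip ∘ "\n".join ignores a leading empty line
theorem pv_strip_ic1_nil_cons (xs : List (List Char)) :
    PySem.Chars.strip (List.intercalate ['\n'] (([] : List Char) :: xs))
      = PySem.Chars.strip (List.intercalate ['\n'] xs) := by
  cases xs with
  | nil => rfl
  | cons y ys =>
    rw [pv_ic_cons2]
    simp only [List.nil_append, List.singleton_append]
    exact pv_strip_cons_nl _

-- strip ∘ "\n".join ignores a prefix of empty lines
theorem pv_strip_ic1_pre (pre xs : List (List Char)) (h : ∀ x ∈ pre, x = ([] : List Char)) :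
    PySem.Chars.strip (List.intercalate ['\n'] (pre ++ xs))
      = PySem.Chars.strip (List.intercalate ['\n'] xs) := by
  induction pre with
  | nil => simp
  | cons p pre ih =>
    have hp : p = ([] : List Char) := h p (by simp)
    subst hp
    rw [List.cons_append, pv_strip_ic1_nil_cons]
    exact ih (fun x hx => h x (by simp [hx]))

-- strip ∘ "\n".join ignores a trailing empty line
theorem pv_strip_ic1_snoc_nil (xs : List (List Char)) :
    PySem.Chars.strip (List.intercalate ['\n'] (xs ++ [([] : List Char)]))
      = PySem.Chars.strip (List.intercalate ['\n'] xs) := by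
  cases xs with
  | nil => rfl
  | cons y ys =>
    rw [pv_ic_snoc _ _ _ (by simp), List.append_nil]
    exact pv_strip_snoc_nl _

-- A's collapse-loop body, as a named function (identical to the lambda in port A)
def pvStepA (st : List (List Char) × Bool) (l : List Char) : List (List Char) × Bool :=
  if l = [] then
    if st.2 then st else (st.1 ++ [([] : List Char)], true)
  else (st.1 ++ [l], false)

-- reconstruction of A's flat collapsed list from B's (paras, cur) state
def pvRecon (pre : List (List Char)) (paras : List (List (List Char)))
    (cur : List (List Char)) (blank : Bool) : List (List Char) :=
  if blank then pre ++ List.intercalate [([] : List Char)] paras ++ [([] : List Char)]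
  else if cur = [] then pre
  else pre ++ List.intercalate [([] : List Char)] (paras ++ [cur])

-- Source B's final render of a fold state
def pvRenderB (st : List (List (List Char)) × List (List Char)) : List Char :=
  List.intercalate ['\n', '\n']
    ((if st.2 ≠ [] then st.1 ++ [st.2] else st.1).map (List.intercalate ['\n']))

-- the bridge: A's collapse fold, started from the reconstruction of B's state, strips to B's render
theorem pv_bridge (T : List (List Char)) : ∀ (pre : List (List Char))
    (paras : List (List (List Char))) (cur : List (List Char)) (blank : Bool),
    (∀ x ∈ pre, x = ([] : List Char)) →
    (∀ p ∈ paras, p ≠ ([] : List (List Char))) →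
    (blank = true → cur = []) →
    (blank = false → cur = [] → paras = []) →
    PySem.Chars.strip (List.intercalate ['\n']
      (T.foldl pvStepA (pvRecon pre paras cur blank, blank)).1)
    = PySem.Chars.strip (pvRenderB (T.foldl pvAccum (paras, cur))) := by
  induction T with
  | nil =>
    intro pre paras cur blank hpre hparas hb hnb
    simp only [List.foldl_nil]
    cases blank with
    | true =>
      have hc : cur = [] := hb rfl
      subst hc
      rw [show pvRecon pre paras [] true
          = pre ++ (List.intercalate [([] : List Char)] paras ++ [([] : List Char)]) from by
            simp [pvRecon]]
      rw [pv_strip_ic1_pre _ _ hpre, pv_strip_ic1_snoc_nil, pv_join_nest paras hparas]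
      simp [pvRenderB]
    | false =>
      by_cases hc : cur = []
      · have hP : paras = [] := hnb rfl hc
        subst hc; subst hP
        rw [show pvRecon pre [] [] false = pre ++ [] from by simp [pvRecon]]
        rw [pv_strip_ic1_pre _ _ hpre]
        simp [pvRenderB, pv_ic_nil]
      · rw [show pvRecon pre paras cur false
            = pre ++ List.intercalate [([] : List Char)] (paras ++ [cur]) from by
              simp [pvRecon, hc]]
        rw [pv_strip_ic1_pre _ _ hpre]
        rw [pv_join_nest (paras ++ [cur]) (by
          intro p hp
          rcases List.mem_append.mp hp with h1 | h1
          · exact hparas p h1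
          · simp only [List.mem_singleton] at h1; subst h1; exact hc)]
        simp [pvRenderB, hc]
  | cons t T ih =>
    intro pre paras cur blank hpre hparas hb hnb
    simp only [List.foldl_cons]
    by_cases ht : t = []
    · subst ht
      cases blank with
      | true =>
        have hc : cur = [] := hb rfl
        subst hc
        rw [show pvStepA (pvRecon pre paras [] true, true) []
            = (pvRecon pre paras [] true, true) from by simp [pvStepA]]
        rw [show pvAccum (paras, []) [] = (paras, ([] : List (List Char))) from by simp [pvAccum]]
        exact ih pre paras [] true hpre hparas (fun _ => rfl) (by simp)
      | false =>
        by_cases hc : cur = []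
        · have hP : paras = [] := hnb rfl hc
          subst hc; subst hP
          rw [show pvStepA (pvRecon pre [] [] false, false) []
              = (pvRecon pre [] [] true, true) from by simp [pvStepA, pvRecon, pv_ic_nil]]
          rw [show pvAccum ([], []) []
              = (([] : List (List (List Char))), ([] : List (List Char))) from by simp [pvAccum]]
          exact ih pre [] [] true hpre (by simp) (fun _ => rfl) (by simp)
        · rw [show pvStepA (pvRecon pre paras cur false, false) []
              = (pvRecon pre (paras ++ [cur]) [] true, true) from by
                simp [pvStepA, pvRecon, hc, List.append_assoc]]
          rw [show pvAccum (paras, cur) [] = (paras ++ [cur], ([] : List (List Char))) from by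
            simp [pvAccum, hc]]
          exact ih pre (paras ++ [cur]) [] true hpre (by
            intro p hp
            rcases List.mem_append.mp hp with h1 | h1
            · exact hparas p h1
            · simp only [List.mem_singleton] at h1; subst h1; exact hc)
            (fun _ => rfl) (by simp)
    · rw [show pvAccum (paras, cur) t = (paras, cur ++ [t]) from by simp [pvAccum, ht]]
      cases blank with
      | true =>
        have hc : cur = [] := hb rfl
        subst hc
        by_cases hP : paras = []
        · subst hP
          rw [show pvStepA (pvRecon pre [] [] true, true) t
              = (pvRecon (pre ++ [([] : List Char)]) [] [t] false, false) from by
                simp [pvStepA, pvRecon, ht, pv_ic_nil, pv_ic_single, List.append_assoc]]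
          exact ih (pre ++ [([] : List Char)]) [] [t] false (by
            intro x hx
            rcases List.mem_append.mp hx with h2 | h2
            · exact hpre x h2
            · simpa using h2) (by simp) (by simp) (by simp)
        · rw [show pvStepA (pvRecon pre paras [] true, true) t
              = (pvRecon pre paras [t] false, false) from by
                simp [pvStepA, pvRecon, ht, pv_ic_snoc [([] : List Char)] paras [t] hP,
                  List.append_assoc]]
          exact ih pre paras [t] false hpre hparas (by simp) (by simp)
      | false =>
        by_cases hc : cur = []
        · have hP : paras = [] := hnb rfl hc
          subst hc; subst hP
          rw [show pvStepA (pvRecon pre [] [] false, false) t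
              = (pvRecon pre [] [t] false, false) from by
                simp [pvStepA, pvRecon, ht, pv_ic_single]]
          exact ih pre [] [t] false hpre (by simp) (by simp) (by simp)
        · rw [show pvStepA (pvRecon pre paras cur false, false) t
              = (pvRecon pre paras (cur ++ [t]) false, false) from by
                simp only [pvStepA, pvRecon, if_neg ht, if_neg hc,
                  if_neg (show ¬(cur ++ [t] = []) from by simp), Bool.false_eq_true, if_false]
                rw [pv_ic_last_extend]
                simp [List.append_assoc]]
          exact ih pre paras (cur ++ [t]) false hpre hparas (by simp) (by simp)

-- ===== VERDICT (by name: the statement is the Claim_ definition above) =====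
theorem clean_for_telegram_py_spec : Claim_equal_clean_for_telegram_py := by
  intro text _
  unfold Spec_clean_for_telegram_py clean_for_telegram_py clean_for_telegram_py_alt
  simp only [pv_lines_eq, List.nil_append, ← List.foldl_map]
  rw [show (fun (st : List (List Char) × Bool) l =>
      if l = [] then
        if st.2 then st else (st.1 ++ [([] : List Char)], true)
      else (st.1 ++ [l], false)) = pvStepA from rfl]
  have hb := pv_bridge ((PySem.Chars.splitlines text.toList).map pvTransform)
    [] [] [] false (by simp) (by simp) (by simp) (fun _ _ => rfl)
  rw [show pvRecon [] [] [] false = ([] : List (List Char)) from by simp [pvRecon]] at hb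
  simp only [PySem.Chars.join]
  rw [hb]
  simp only [pvRenderB, ne_eq, ite_not]
  rfl
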